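-- pv_equiv track=rewrite | github.com/symjamie/EMSE_DevInt | python/lib/JSONReader.py | get_duplicate_answer_indices
-- ===== SOURCE A (Python) =====
-- from collections import defaultdict
--
-- def get_duplicate_answer_indices(answers):
--     index_dict = defaultdict(list)
--
--     for answer in range(0, len(answers['items'])):
--         answer_id = answers['items'][answer]['answer_id']
--         index_dict[answer_id].append(answer)
--
--     # Slice first index of every answer
--     for answer_id in index_dict:
--         index_dict[answer_id] = index_dict[answer_id][1:]
--
--     return index_dict
-- ===== SOURCE B (Python) =====
-- from collections import defaultdict
--
-- def get_duplicate_answer_indices(answers):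
--     ids = [item['answer_id'] for item in answers['items']]
--     index_dict = defaultdict(list)
--     for aid in dict.fromkeys(ids):
--         first = ids.index(aid)
--         index_dict[aid] = [i for i in range(first + 1, len(ids)) if ids[i] == aid]
--     return index_dict
-- ===== Notes on version B (the rewrite author's own statement) =====
-- stated objective: alternative
-- what changed: Instead of A's single grouping pass over all indices followed by a slicing pass over the dict, B extracts the ids list, then for each distinct id (in dict.fromkeys order) finds its first position with list.index and collects the later matching indices by a fresh scan over range(first+1, n) - per-key scans replace group-then-slice.
import Mathlib
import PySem

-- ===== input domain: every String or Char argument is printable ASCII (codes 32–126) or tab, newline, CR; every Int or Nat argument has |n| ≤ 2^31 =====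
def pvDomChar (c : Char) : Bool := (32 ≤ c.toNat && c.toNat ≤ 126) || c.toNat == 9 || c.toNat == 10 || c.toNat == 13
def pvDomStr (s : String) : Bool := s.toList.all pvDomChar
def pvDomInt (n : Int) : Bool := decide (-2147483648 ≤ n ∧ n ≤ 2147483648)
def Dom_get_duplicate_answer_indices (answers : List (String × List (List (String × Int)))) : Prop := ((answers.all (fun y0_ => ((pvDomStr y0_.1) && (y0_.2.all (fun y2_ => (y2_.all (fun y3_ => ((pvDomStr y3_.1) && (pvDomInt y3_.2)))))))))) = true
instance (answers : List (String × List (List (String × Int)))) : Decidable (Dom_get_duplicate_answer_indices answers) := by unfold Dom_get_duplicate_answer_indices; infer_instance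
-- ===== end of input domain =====

-- B replaces A's group-then-slice (one pass appending every index to its id's group,
-- then slicing each group's head off) by per-key scans: for each distinct id, find its
-- first position with list.index and re-scan the later indices; same return value.


-- ===== PORT A =====
-- loop body of A's grouping pass: index_dict[answers['items'][answer]['answer_id']].append(answer)
def pvItemA (d : PySem.Dict Int (List Int)) (i : Int) (item : List (String × Int)) : PySem.Dict Int (List Int) :=
  match (PySem.Dict.mk item).get? "answer_id" with
  | none => d        -- item['answer_id'] raises KeyError: excluded by Pre_
  | some aid => d.insert aid (d.getD aid [] ++ [i])

def pvLoopA (its : List (List (String × Int))) (d : PySem.Dict Int (List Int)) (i : Int) : PySem.Dict Int (List Int) :=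
  match PySem.List.pyGet? its i with
  | none => d        -- unreachable: i ranges over the indices of its
  | some item => pvItemA d i item

def get_duplicate_answer_indices (answers : List (String × List (List (String × Int)))) : List (Int × List Int) :=
  match (PySem.Dict.mk answers).get? "items" with
  | none => []        -- answers['items'] raises KeyError: excluded by Pre_
  | some its =>
    -- for answer in range(0, len(answers['items'])): index_dict[answer_id].append(answer)
    let d := (PySem.List.pyRange 0 (its.length : Int) 1).foldl (pvLoopA its) PySem.Dict.empty
    -- for answer_id in index_dict: index_dict[answer_id] = index_dict[answer_id][1:]
    (d.keys.foldl (fun d k => d.insert k (PySem.List.slice (d.getD k []) (some 1) none)) d).items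

-- ===== PORT B =====
-- item['answer_id'] of one item (KeyError, i.e. the none case, is excluded by Pre_)
def pvAidB (item : List (String × Int)) : Int :=
  ((PySem.Dict.mk item).get? "answer_id").getD 0

def get_duplicate_answer_indices_alt (answers : List (String × List (List (String × Int)))) : List (Int × List Int) :=
  match (PySem.Dict.mk answers).get? "items" with
  | none => []        -- answers['items'] raises KeyError: excluded by Pre_
  | some its =>
    -- ids = [item['answer_id'] for item in answers['items']]
    let ids := its.map pvAidB
    -- for aid in dict.fromkeys(ids): first = ids.index(aid);
    --   index_dict[aid] = [i for i in range(first + 1, len(ids)) if ids[i] == aid]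
    ((PySem.List.dedup ids).foldl
      (fun d aid =>
        let first : Int := (((PySem.List.index? ids aid).getD 0 : Nat) : Int)  -- aid ∈ ids, so index never raises
        d.insert aid
          ((PySem.List.pyRange (first + 1) (PySem.List.len ids)).filter
            (fun i => PySem.List.pyGet? ids i == some aid)))
      PySem.Dict.empty).items

-- ===== PRECONDITION & SPEC =====
-- Pre_ excludes exactly the inputs on which the Python A raises KeyError:
-- a dict without the "items" key, or an item without the "answer_id" key.
def Pre_get_duplicate_answer_indices (answers : List (String × List (List (String × Int)))) : Prop :=
  (PySem.Dict.mk answers).contains "items" = true ∧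
  ∀ it ∈ ((PySem.Dict.mk answers).get? "items").getD [], (PySem.Dict.mk it).contains "answer_id" = true
instance (answers : List (String × List (List (String × Int)))) : Decidable (Pre_get_duplicate_answer_indices answers) := by unfold Pre_get_duplicate_answer_indices; infer_instance

def pvWitness_get_duplicate_answer_indices : (List (String × List (List (String × Int)))) :=
  [("items", [[("answer_id", 1)], [("answer_id", 2)], [("answer_id", 1)]])]

def Spec_get_duplicate_answer_indices (answers : List (String × List (List (String × Int)))) (out : List (Int × List Int)) : Prop := out = get_duplicate_answer_indices_alt answers
instance (answers : List (String × List (List (String × Int)))) (out : List (Int × List Int)) : Decidable (Spec_get_duplicate_answer_indices answers out) := by unfold Spec_get_duplicate_answer_indices; infer_instance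

-- ===== CLAIM (what is proved, stated in full; the proofs are below) =====
def Claim_equal_get_duplicate_answer_indices : Prop := ∀ (answers : List (String × List (List (String × Int)))), Dom_get_duplicate_answer_indices answers → Pre_get_duplicate_answer_indices answers → Spec_get_duplicate_answer_indices answers (get_duplicate_answer_indices answers)

-- ===== LEMMAS AND PROOFS =====

-- proof-side step function: A's grouping loop body on a pure (index, id) pair
def pvStepA (d : PySem.Dict Int (List Int)) (p : Int × Int) : PySem.Dict Int (List Int) :=
  d.insert p.2 (d.getD p.2 [] ++ [p.1])

def pvPairs (its : List (List (String × Int))) : List (Int × Int) :=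
  (PySem.List.enumerate its 0).map (fun p => (p.1, pvAidB p.2))

-- A's second pass (slice each value) over a dict whose keys it all contains
theorem pv_second (ks : List Int) :
    ∀ (d : PySem.Dict Int (List Int)), d.keys.Nodup → ks.Nodup →
      (∀ k ∈ ks, d.contains k = true) →
      (ks.foldl (fun d k => d.insert k (d.getD k []).tail) d).items
        = d.items.map (fun p => if p.1 ∈ ks then (p.1, p.2.tail) else p) := by
  induction ks with
  | nil => intro d _ _ _; simp
  | cons k ks ih =>
    intro d hnd hks hc
    have hck : d.contains k = true := hc k List.mem_cons_self
    simp only [List.foldl_cons]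
    have hnd' : (d.insert k (d.getD k []).tail).keys = d.keys :=
      PySem.Dict.keys_insert_of_contains d _ hck
    rw [ih (d.insert k (d.getD k []).tail) (hnd' ▸ hnd) (List.nodup_cons.mp hks).2
        (by
          intro k' hk'
          rw [PySem.Dict.contains_insert]
          simp [hc k' (List.mem_cons_of_mem k hk')])]
    rw [PySem.Dict.items_insert_of_contains d _ hck, List.map_map]
    apply List.map_congr_left
    intro p hp
    by_cases hpk : (p.1 == k) = true
    · have hpk' : p.1 = k := by simpa using hpk
      have hknotin : k ∉ ks := (List.nodup_cons.mp hks).1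
      have hgd : d.getD p.1 [] = p.2 := by
        obtain ⟨a, b⟩ := p
        exact PySem.Dict.getD_of_mem_items d hp hnd []
      simp only [Function.comp_apply, hpk, if_true]
      rw [hpk'] at hgd ⊢
      simp [hknotin, ← hgd]
    · have hpk' : p.1 ≠ k := by simpa using hpk
      simp only [Function.comp_apply, hpk]
      by_cases hin : p.1 ∈ ks
      · simp [hin, List.mem_cons, hpk']
      · simp [hin, List.mem_cons, hpk']

-- A's first pass, rephrased: the range-indexed loop is the fold over enumerate
theorem pv_fold_enum_aux (xs : List (List (String × Int))) :
    ∀ (pre : List (List (String × Int))) (init : PySem.Dict Int (List Int)),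
      (PySem.List.pyRange (pre.length : Int) ((pre.length : Int) + (xs.length : Int)) 1).foldl
          (pvLoopA (pre ++ xs)) init
        = (PySem.List.enumerate xs (pre.length : Int)).foldl (fun d p => pvItemA d p.1 p.2) init := by
  induction xs with
  | nil =>
    intro pre init
    rw [PySem.List.pyRange_one_eq_nil (by simp)]
    rfl
  | cons x xs ih =>
    intro pre init
    rw [PySem.List.pyRange_one_cons (by simp only [List.length_cons]; push_cast; omega),
        PySem.List.enumerate_cons]
    simp only [List.foldl_cons]
    have hb : pvLoopA (pre ++ x :: xs) init (pre.length : Int) = pvItemA init (pre.length : Int) x := by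
      rw [pvLoopA, PySem.List.pyGet?_append_length]
    rw [hb]
    have h1 : pre ++ x :: xs = (pre ++ [x]) ++ xs := by simp
    have h2 : ((pre.length : Int) + 1) = (((pre ++ [x]).length : Int)) := by simp
    have h3 : ((pre.length : Int) + ((x :: xs).length : Int))
        = (((pre ++ [x]).length : Int) + (xs.length : Int)) := by
      simp only [List.length_cons, List.length_append, List.length_cons, List.length_nil]
      push_cast
      ring
    rw [h1, h2, h3]
    exact ih (pre ++ [x]) (pvItemA init (pre.length : Int) x)

theorem pv_foldA (its : List (List (String × Int))) :
    (PySem.List.pyRange 0 (its.length : Int) 1).foldl (pvLoopA its) PySem.Dict.empty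
      = (PySem.List.enumerate its 0).foldl (fun d p => pvItemA d p.1 p.2) PySem.Dict.empty := by
  have h := pv_fold_enum_aux its [] PySem.Dict.empty
  simp only [List.nil_append, List.length_nil, Nat.cast_zero, zero_add] at h
  exact h

theorem pv_enumA (its : List (List (String × Int)))
    (hid : ∀ it ∈ its, (PySem.Dict.mk it).contains "answer_id" = true) :
    (PySem.List.enumerate its 0).foldl (fun d p => pvItemA d p.1 p.2) PySem.Dict.empty
      = (pvPairs its).foldl pvStepA PySem.Dict.empty := by
  rw [pvPairs, List.foldl_map]
  apply PySem.List.foldl_congr_mem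
  intro acc p hp
  have hmem : p.2 ∈ its := by
    have h := PySem.List.map_snd_enumerate its 0
    exact h ▸ List.mem_map_of_mem hp
  have h2 := hid p.2 hmem
  rw [PySem.Dict.contains_eq_isSome_get?] at h2
  obtain ⟨aid, ha⟩ := Option.isSome_iff_exists.mp h2
  rw [pvItemA, ha]
  simp [pvStepA, pvAidB, ha]

-- enumerate commutes with mapping the element
theorem pv_enumerate_map {α β : Type} (f : α → β) (xs : List α) :
    ∀ s : Int, (PySem.List.enumerate xs s).map (fun p => (p.1, f p.2))
      = PySem.List.enumerate (xs.map f) s := by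
  induction xs with
  | nil => intro s; rfl
  | cons x xs ih =>
    intro s
    simp only [List.map_cons, PySem.List.enumerate_cons, List.map_cons]
    exact congrArg _ (ih (s + 1))

-- the indices of the occurrences of k: via enumerate = via a filtered index range
theorem pv_enum_filter_aux (k : Int) :
    ∀ (ids pre : List Int),
      ((PySem.List.enumerate ids (pre.length : Int)).filter (fun p => p.2 == k)).map (fun p => p.1)
        = (PySem.List.pyRange (pre.length : Int) ((pre.length : Int) + (ids.length : Int))).filter
            (fun i => PySem.List.pyGet? (pre ++ ids) i == some k) := by
  intro ids
  induction ids with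
  | nil =>
    intro pre
    rw [PySem.List.pyRange_one_eq_nil (by simp)]
    rfl
  | cons x xs ih =>
    intro pre
    rw [PySem.List.enumerate_cons,
        PySem.List.pyRange_one_cons (by simp only [List.length_cons]; push_cast; omega)]
    have hg : PySem.List.pyGet? (pre ++ x :: xs) (pre.length : Int) = some x :=
      PySem.List.pyGet?_append_length pre xs x
    have htail : ((PySem.List.enumerate xs ((pre.length : Int) + 1)).filter
          (fun p => p.2 == k)).map (fun p => p.1)
        = (PySem.List.pyRange ((pre.length : Int) + 1)
            ((pre.length : Int) + ((x :: xs).length : Int))).filter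
            (fun i => PySem.List.pyGet? (pre ++ x :: xs) i == some k) := by
      have h1 : pre ++ x :: xs = (pre ++ [x]) ++ xs := by simp
      have h2 : ((pre.length : Int) + 1) = (((pre ++ [x]).length : Int)) := by simp
      have h3 : ((pre.length : Int) + ((x :: xs).length : Int))
          = (((pre ++ [x]).length : Int) + (xs.length : Int)) := by
        simp only [List.length_cons, List.length_append, List.length_cons, List.length_nil]
        push_cast
        ring
      rw [h1, h2, h3]
      exact ih (pre ++ [x])
    simp only [List.filter_cons, hg]
    by_cases hx : (x == k) = true
    · simp only [hx, show ((some x == some k) = true) from by simpa using hx,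
        if_pos, List.map_cons, htail]
    · simp only [hx, show ((some x == some k) = false) from by simpa using hx,
        Bool.false_eq_true, if_neg, not_false_iff, htail]

theorem pv_G (ids : List Int) (k : Int) :
    ((PySem.List.enumerate ids 0).filter (fun p => p.2 == k)).map (fun p => p.1)
      = (PySem.List.pyRange 0 ((ids.length : Int))).filter
          (fun i => PySem.List.pyGet? ids i == some k) := by
  have h := pv_enum_filter_aux k ids []
  simpa using h

-- the filtered full range is the first occurrence consed on B's filtered tail range
theorem pv_val (ids : List Int) (k : Int) (f : Nat)
    (hf : PySem.List.index? ids k = some f) :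
    (PySem.List.pyRange 0 ((ids.length : Int))).filter
        (fun i => PySem.List.pyGet? ids i == some k)
      = (f : Int) :: (PySem.List.pyRange ((f : Int) + 1) ((ids.length : Int))).filter
          (fun i => PySem.List.pyGet? ids i == some k) := by
  obtain ⟨hflt, hfk, hbefore⟩ := PySem.List.getElem_of_index?_eq_some hf
  have hsplit : PySem.List.pyRange 0 ((ids.length : Int))
      = PySem.List.pyRange 0 (f : Int) ++ PySem.List.pyRange (f : Int) ((ids.length : Int)) :=
    PySem.List.pyRange_one_append 0 (f : Int) ((ids.length : Int)) (by positivity)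
      (by exact_mod_cast hflt.le)
  have hcons : PySem.List.pyRange (f : Int) ((ids.length : Int))
      = (f : Int) :: PySem.List.pyRange ((f : Int) + 1) ((ids.length : Int)) :=
    PySem.List.pyRange_one_cons (by exact_mod_cast hflt)
  rw [hsplit, hcons, List.filter_append, List.filter_cons]
  have hpre : (PySem.List.pyRange 0 (f : Int)).filter
      (fun i => PySem.List.pyGet? ids i == some k) = [] := by
    rw [List.filter_eq_nil_iff]
    intro x hx
    obtain ⟨hx0, hxf⟩ := PySem.List.mem_pyRange_one.mp hx
    obtain ⟨m, rfl⟩ := Int.eq_ofNat_of_zero_le hx0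
    have hmf : m < f := by exact_mod_cast hxf
    have hml : m < ids.length := lt_trans hmf hflt
    rw [PySem.List.pyGet?_natCast, List.getElem?_eq_getElem hml]
    simp [hbefore m hmf]
  have hhead : (PySem.List.pyGet? ids ((f : Int)) == some k) = true := by
    rw [PySem.List.pyGet?_natCast, List.getElem?_eq_getElem hflt]
    simp [hfk]
  rw [hpre, hhead]
  simp

-- B's per-key insert loop over the distinct ids writes each (key, value) pair once
theorem pv_fresh (ks : List Int) (v : Int → List Int) (hnd : ks.Nodup) :
    (ks.foldl (fun d aid => d.insert aid (v aid)) (PySem.Dict.empty : PySem.Dict Int (List Int))).items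
      = ks.map (fun aid => (aid, v aid)) := by
  have h := PySem.Dict.items_foldl_insert_fresh ks (fun a => a) v
      (PySem.Dict.empty : PySem.Dict Int (List Int))
      (by intro a _; simp [pysem]) (by simpa using hnd)
  simpa using h

theorem pv_main : ∀ (answers : List (String × List (List (String × Int)))),
    Pre_get_duplicate_answer_indices answers →
    get_duplicate_answer_indices answers = get_duplicate_answer_indices_alt answers := by
  intro answers hpre
  obtain ⟨hc, hid⟩ := hpre
  rw [PySem.Dict.contains_eq_isSome_get?] at hc
  obtain ⟨its, hits⟩ := Option.isSome_iff_exists.mp hc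
  rw [hits] at hid
  simp only [Option.getD_some] at hid
  unfold get_duplicate_answer_indices get_duplicate_answer_indices_alt
  rw [hits]
  simp only [PySem.List.slice_from_one]
  rw [pv_foldA its, pv_enumA its hid]
  set ids := its.map pvAidB with hids
  set dA := (pvPairs its).foldl pvStepA PySem.Dict.empty with hdA
  -- A's dict: keys are the distinct ids in order, values the full index groups
  have hkeymap : (pvPairs its).map (fun p => p.2) = ids := by
    rw [pvPairs, List.map_map, hids]
    have := PySem.List.map_snd_enumerate its 0
    calc (PySem.List.enumerate its 0).map ((fun p : Int × Int => p.2) ∘ (fun p => (p.1, pvAidB p.2)))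
        = (PySem.List.enumerate its 0).map (pvAidB ∘ (fun p : Int × List (String × Int) => p.2)) := rfl
      _ = ((PySem.List.enumerate its 0).map (fun p => p.2)).map pvAidB := by rw [List.map_map]
      _ = its.map pvAidB := by rw [this]
  have hstep : pvStepA = (fun (d : PySem.Dict Int (List Int)) (p : Int × Int) =>
      d.insert p.2 (d.getD p.2 [] ++ [p.1])) := rfl
  have hkeys : dA.keys = PySem.List.dedup ids := by
    rw [hdA, hstep, PySem.Dict.keys_foldl_insert_key (pvPairs its) (fun p => p.2)
      (fun d p => d.getD p.2 [] ++ [p.1]), hkeymap, PySem.List.dedup_eq_ofList]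
    rfl
  have hnd : dA.keys.Nodup := by
    rw [hkeys]; exact PySem.List.nodup_dedup ids
  have hgd : ∀ c, dA.getD c []
      = ((pvPairs its).filter (fun p => p.2 == c)).map (fun p => p.1) := by
    intro c
    have hmod : dA = ((pvPairs its).map Prod.swap).foldl
        (fun d q => d.modify q.1 [] (fun w => w ++ [q.2])) PySem.Dict.empty := by
      rw [hdA, List.foldl_map]
      rfl
    rw [hmod, PySem.Dict.getD_foldl_modify_append]
    have hfm : ((pvPairs its).map Prod.swap).filter (fun q => q.1 == c)
        = ((pvPairs its).filter (fun p => p.2 == c)).map Prod.swap := by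
      rw [List.filter_map]
      rfl
    rw [hfm, List.map_map]
    rfl
  have hitems : dA.items = dA.keys.map (fun c => (c, dA.getD c [])) :=
    PySem.Dict.items_eq_map_keys dA hnd []
  -- A's second pass
  rw [pv_second dA.keys dA hnd hnd
      (fun c hc' => (PySem.Dict.contains_iff_mem_keys dA c).mpr hc')]
  rw [hitems, List.map_map]
  -- B's loop
  rw [pv_fresh (PySem.List.dedup ids)
      (fun aid => (PySem.List.pyRange
          ((((PySem.List.index? ids aid).getD 0 : Nat) : Int) + 1) (PySem.List.len ids)).filter
          (fun i => PySem.List.pyGet? ids i == some aid))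
      (PySem.List.nodup_dedup ids)]
  rw [hkeys]
  apply List.map_congr_left
  intro c hcdedup
  have hcmem : c ∈ ids := (PySem.List.mem_dedup ids c).mp hcdedup
  obtain ⟨f, hf⟩ := Option.isSome_iff_exists.mp
    ((PySem.List.index?_isSome_iff ids c).mpr hcmem)
  have hGc : dA.getD c [] = (PySem.List.pyRange 0 ((ids.length : Int))).filter
      (fun i => PySem.List.pyGet? ids i == some c) := by
    rw [hgd c, pvPairs]
    have : ((PySem.List.enumerate its 0).map (fun p => (p.1, pvAidB p.2)))
        = PySem.List.enumerate ids 0 := pv_enumerate_map pvAidB its 0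
    rw [this, pv_G]
  simp only [Function.comp_apply, hcdedup, if_pos]
  rw [hGc, pv_val ids c f hf, hf]
  simp

-- ===== VERDICT (by name: the statement is the Claim_ definition above) =====
theorem get_duplicate_answer_indices_spec : Claim_equal_get_duplicate_answer_indices := by
  intro answers _ hpre
  unfold Spec_get_duplicate_answer_indices
  exact pv_main answers hpre
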